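-- pv_equiv track=rewrite | github.com/statisticsnorway/dapla-toolbelt-metadata | src/dapla_metadata/datasets/dapla_dataset_path_info.py | _get_left_parts
-- ===== SOURCE A (Python) =====
-- def _get_left_parts(
--
--     dataset_path_parts: list[str],
--     state_index: int,
-- ) -> list[str]:
--     """Retrieve the path parts before the dataset state, considering bucket prefixes."""
--     bucket_prefix = {"gs:", "buckets"}
--     left_parts = dataset_path_parts[:state_index]
--
--     # Stop checking beyond the bucket prefix
--     prefix_intersection = bucket_prefix & set(left_parts)
--     if prefix_intersection:
--         first_prefix = min(
--             left_parts.index(prefix) for prefix in prefix_intersection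
--         )
--         left_parts = left_parts[first_prefix:]
--
--     return (
--         []
--         if left_parts == ["/"]
--         or (left_parts[0] in bucket_prefix and len(left_parts) <= 2)
--         else left_parts
--     )
-- ===== SOURCE B (Python) =====
-- def _get_left_parts(
--     dataset_path_parts: list[str],
--     state_index: int,
-- ) -> list[str]:
--     """Retrieve the path parts before the dataset state, considering bucket prefixes."""
--     left_parts = dataset_path_parts[:state_index]
--     # Treat the reversed list as a stack: pop trailing elements (i.e. leading
--     # elements of left_parts) until a bucket prefix surfaces or the stack empties.
--     rev = left_parts[::-1]
--     while rev and rev[-1] not in ("gs:", "buckets"):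
--         rev.pop()
--     if rev:
--         suffix = rev[::-1]
--         return suffix if len(suffix) > 2 else []
--     return [] if left_parts == ["/"] else left_parts
-- ===== Notes on version B (the rewrite author's own statement) =====
-- stated objective: alternative
-- what changed: Replaces A's set-intersection plus per-prefix .index/min multi-pass with a reversed-list stack: reverse the slice, pop trailing elements until a bucket prefix surfaces or the stack empties, reverse back, and finish with a plain two-case wrap-up instead of A's guard ternary.
import Mathlib
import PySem

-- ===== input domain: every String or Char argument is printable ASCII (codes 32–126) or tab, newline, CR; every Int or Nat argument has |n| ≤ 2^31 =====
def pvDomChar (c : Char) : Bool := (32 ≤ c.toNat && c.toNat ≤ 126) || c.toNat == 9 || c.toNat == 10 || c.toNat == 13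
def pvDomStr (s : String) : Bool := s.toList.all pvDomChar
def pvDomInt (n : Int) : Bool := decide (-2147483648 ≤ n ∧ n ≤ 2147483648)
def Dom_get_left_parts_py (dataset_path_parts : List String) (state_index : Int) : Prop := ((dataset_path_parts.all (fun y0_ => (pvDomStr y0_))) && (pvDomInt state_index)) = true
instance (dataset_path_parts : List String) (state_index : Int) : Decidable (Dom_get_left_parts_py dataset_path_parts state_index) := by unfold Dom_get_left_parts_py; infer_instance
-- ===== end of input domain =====

-- B replaces A's set-intersection + per-prefix .index/min index arithmetic with a reversed-list
-- stack: pop trailing non-prefix elements, then reverse back (objective: alternative, same O(n) cost).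

-- ===== PORT A =====
def get_left_parts_py (dataset_path_parts : List String) (state_index : Int) : List String :=
  -- bucket_prefix = {"gs:", "buckets"}
  let bucket_prefix : PySem.Set String := PySem.Set.ofList ["gs:", "buckets"]
  -- left_parts = dataset_path_parts[:state_index]
  let left_parts0 := PySem.List.slice dataset_path_parts none (some state_index)
  -- prefix_intersection = bucket_prefix & set(left_parts)
  let prefix_intersection := PySem.Set.inter bucket_prefix (PySem.Set.ofList left_parts0)
  -- if prefix_intersection: first_prefix = min(left_parts.index(p) for p in prefix_intersection); left_parts = left_parts[first_prefix:]
  let left_parts :=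
    if prefix_intersection = [] then left_parts0
    else
      -- every p in the intersection is a member of left_parts0, so index? is some; .getD 0 is unreachable
      let first_prefix : Int :=
        (PySem.List.min?
          (prefix_intersection.map (fun p => (((PySem.List.index? left_parts0 p).getD 0 : Nat) : Int)))
          (fun x => x)).getD 0
      PySem.List.slice left_parts0 (some first_prefix) none
  -- return [] if left_parts == ["/"] or (left_parts[0] in bucket_prefix and len(left_parts) <= 2) else left_parts
  if left_parts = ["/"] then []
  else
    match PySem.List.pyGet? left_parts 0 with
    | none => []  -- left_parts[0] raises IndexError in Python here; such inputs are outside Pre_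
    | some x => if PySem.Set.contains bucket_prefix x ∧ left_parts.length ≤ 2 then [] else left_parts

-- ===== PORT B =====
-- the while loop: pop the stack's top (rev[-1], List.getLast?) while it is not a bucket prefix
def pvPopLoop (rev : List String) : List String :=
  match _hl : rev.getLast? with
  | none => rev
  | some x =>
    if x = "gs:" ∨ x = "buckets" then rev
    else pvPopLoop rev.dropLast
termination_by rev.length
decreasing_by
  have hne : rev ≠ [] := by intro h; subst h; simp at _hl
  have := List.length_pos_of_ne_nil hne
  simp [List.length_dropLast]; omega

def get_left_parts_py_alt (dataset_path_parts : List String) (state_index : Int) : List String :=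
  let left_parts := PySem.List.slice dataset_path_parts none (some state_index)
  -- rev = left_parts[::-1]  (Python's [::-1] is List.reverse)
  let rev := pvPopLoop left_parts.reverse
  if rev ≠ [] then
    let suffix := rev.reverse
    if suffix.length > 2 then suffix else []
  else if left_parts = ["/"] then [] else left_parts

-- ===== PRECONDITION & SPEC =====
-- Pre_ excludes exactly the inputs with an empty slice dataset_path_parts[:state_index],
-- on which A raises IndexError at left_parts[0].
def Pre_get_left_parts_py (dataset_path_parts : List String) (state_index : Int) : Prop :=
  PySem.List.slice dataset_path_parts none (some state_index) ≠ []
instance (dataset_path_parts : List String) (state_index : Int) : Decidable (Pre_get_left_parts_py dataset_path_parts state_index) := by unfold Pre_get_left_parts_py; infer_instance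

def pvWitness_get_left_parts_py : List String × Int := (["gs:", "bucket", "data", "raw"], 3)

def Spec_get_left_parts_py (dataset_path_parts : List String) (state_index : Int) (out : List String) : Prop := out = get_left_parts_py_alt dataset_path_parts state_index
instance (dataset_path_parts : List String) (state_index : Int) (out : List String) : Decidable (Spec_get_left_parts_py dataset_path_parts state_index out) := by unfold Spec_get_left_parts_py; infer_instance

-- ===== CLAIM (what is proved, stated in full; the proofs are below) =====
def Claim_equal_get_left_parts_py : Prop := ∀ (dataset_path_parts : List String) (state_index : Int), Dom_get_left_parts_py dataset_path_parts state_index → Pre_get_left_parts_py dataset_path_parts state_index → Spec_get_left_parts_py dataset_path_parts state_index (get_left_parts_py dataset_path_parts state_index)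


-- ===== LEMMAS AND PROOFS =====

-- position of the first bucket-prefix element, expressed through the first occurrences of the two prefixes
def pvFirstPrefixIdx (l : List String) : Option Nat :=
  match List.idxOf? "gs:" l, List.idxOf? "buckets" l with
  | none,   none   => none
  | some a, none   => some a
  | none,   some b => some b
  | some a, some b => some (min a b)

-- B's stack loop, read on the un-reversed list: it yields the reversed suffix
-- at the first bucket-prefix position, or [] if there is none
theorem pvPopLoop_reverse_eq (L : List String) :
    pvPopLoop L.reverse =
      (match pvFirstPrefixIdx L with
       | some j => (L.drop j).reverse
       | none   => []) := by
  induction L with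
  | nil => simp [pvPopLoop, pvFirstPrefixIdx]
  | cons part rest ih =>
    rw [List.reverse_cons]
    by_cases hp : part = "gs:" ∨ part = "buckets"
    · rw [show pvPopLoop (rest.reverse ++ [part]) = rest.reverse ++ [part] by
        rw [pvPopLoop]
        split
        · rfl
        · next x heq =>
            have hx : x = part := by simpa [List.getLast?_concat] using heq.symm
            subst hx
            exact if_pos hp]
      rcases hp with h | h <;> subst h <;>
        simp [pvFirstPrefixIdx, List.idxOf?_cons] <;>
        cases List.idxOf? "gs:" rest <;> cases List.idxOf? "buckets" rest <;> simp
    · push Not at hp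
      obtain ⟨h1, h2⟩ := hp
      rw [show pvPopLoop (rest.reverse ++ [part]) = pvPopLoop rest.reverse by
        rw [pvPopLoop]
        split
        · next heq => simp at heq
        · next x heq =>
            have hx : x = part := by simpa [List.getLast?_concat] using heq.symm
            subst hx
            rw [if_neg (by simp [h1, h2]), List.dropLast_concat], ih]
      have hfp : pvFirstPrefixIdx (part :: rest) = (pvFirstPrefixIdx rest).map (· + 1) := by
        simp [pvFirstPrefixIdx, List.idxOf?_cons, h1, h2]
        cases List.idxOf? "gs:" rest <;> cases List.idxOf? "buckets" rest <;>
          simp [Nat.succ_min_succ]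
      rw [hfp]
      cases pvFirstPrefixIdx rest <;> simp

-- helper: the found-prefix case, shared between the three nonempty-intersection cases of pvMain
theorem pvFound (L : List String) (m : Nat) (hm : m < L.length)
    (hhead : L[m] = "gs:" ∨ L[m] = "buckets") :
    (if PySem.List.slice L (some (m : Int)) none = ["/"] then []
     else
       match PySem.List.pyGet? (PySem.List.slice L (some (m : Int)) none) 0 with
       | none => []
       | some x =>
         if (PySem.Set.ofList ["gs:", "buckets"]).contains x = true ∧
             (PySem.List.slice L (some (m : Int)) none).length ≤ 2 then []
         else PySem.List.slice L (some (m : Int)) none) =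
    (if (L.drop m).reverse ≠ [] then
       (if (L.drop m).reverse.reverse.length > 2 then (L.drop m).reverse.reverse else [])
     else if L = ["/"] then [] else L) := by
  have hrne : (L.drop m).reverse ≠ [] := by
    simp only [ne_eq, List.reverse_eq_nil_iff, List.drop_eq_nil_iff, not_le]
    omega
  rw [if_pos hrne]
  simp only [List.reverse_reverse]
  rw [PySem.List.slice_from_natCast, List.drop_eq_getElem_cons hm]
  have hne : (L[m] :: List.drop (m + 1) L) ≠ ["/"] := by
    intro heq
    rcases List.cons.injEq .. ▸ heq with ⟨h1, -⟩
    rcases hhead with h | h <;> rw [h] at h1 <;> simp at h1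
  rw [if_neg hne]
  rw [show PySem.List.pyGet? (L[m] :: List.drop (m + 1) L) 0 = some L[m] by
        simp [PySem.List.pyGet?, PySem.List.pyIdx?, hm]]
  have hcont : (PySem.Set.ofList ["gs:", "buckets"]).contains L[m] = true := by
    rcases hhead with h | h <;> rw [h] <;> decide
  simp only [hcont, true_and]
  by_cases hc : (L[m] :: List.drop (m + 1) L).length ≤ 2
  · rw [if_pos hc, if_neg (by omega)]
  · rw [if_neg hc, if_pos (by omega)]

theorem idx_some_of_mem (L : List String) (v : String) (h : v ∈ L) : ∃ a, List.idxOf? v L = some a := by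
  have := (PySem.List.index?_isSome_iff L v).mpr h
  rw [PySem.List.index?_eq_idxOf?] at this
  exact Option.isSome_iff_exists.mp this

theorem pvMain (L : List String) (hpre : L ≠ []) :
    (if
        (if (PySem.Set.ofList ["gs:", "buckets"]).inter (PySem.Set.ofList L) = [] then L
          else
            PySem.List.slice L
              (some ((PySem.List.min?
                      (List.map (fun p => ((((PySem.List.index? L p).getD 0 : Nat)) : Int))
                        ((PySem.Set.ofList ["gs:", "buckets"]).inter (PySem.Set.ofList L)))
                      fun x => x).getD 0))) = ["/"] then []
    else
      match PySem.List.pyGet?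
          (if (PySem.Set.ofList ["gs:", "buckets"]).inter (PySem.Set.ofList L) = [] then L
          else
            PySem.List.slice L
              (some ((PySem.List.min?
                      (List.map (fun p => ((((PySem.List.index? L p).getD 0 : Nat)) : Int))
                        ((PySem.Set.ofList ["gs:", "buckets"]).inter (PySem.Set.ofList L)))
                      fun x => x).getD 0))) 0 with
      | none => []
      | some x =>
        if (PySem.Set.ofList ["gs:", "buckets"]).contains x = true ∧
              (if (PySem.Set.ofList ["gs:", "buckets"]).inter (PySem.Set.ofList L) = [] then L
                else
                  PySem.List.slice L
                    (some ((PySem.List.min?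
                            (List.map (fun p => ((((PySem.List.index? L p).getD 0 : Nat)) : Int))
                              ((PySem.Set.ofList ["gs:", "buckets"]).inter (PySem.Set.ofList L)))
                            fun x => x).getD 0))).length ≤ 2 then []
        else
          if (PySem.Set.ofList ["gs:", "buckets"]).inter (PySem.Set.ofList L) = [] then L
          else
            PySem.List.slice L
              (some ((PySem.List.min?
                      (List.map (fun p => ((((PySem.List.index? L p).getD 0 : Nat)) : Int))
                        ((PySem.Set.ofList ["gs:", "buckets"]).inter (PySem.Set.ofList L)))
                      fun x => x).getD 0))) =
    (if pvPopLoop L.reverse ≠ [] then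
       (if (pvPopLoop L.reverse).reverse.length > 2 then (pvPopLoop L.reverse).reverse else [])
     else if L = ["/"] then [] else L) := by
  rw [pvPopLoop_reverse_eq]
  by_cases hga : "gs:" ∈ L <;> by_cases hbu : "buckets" ∈ L
  · -- both prefixes occur
    obtain ⟨a, hia⟩ := idx_some_of_mem L _ hga
    obtain ⟨b, hib⟩ := idx_some_of_mem L _ hbu
    have hima : PySem.List.index? L "gs:" = some a := by rw [PySem.List.index?_eq_idxOf?]; exact hia
    have himb : PySem.List.index? L "buckets" = some b := by rw [PySem.List.index?_eq_idxOf?]; exact hib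
    have hInter : (PySem.Set.ofList ["gs:", "buckets"]).inter (PySem.Set.ofList L) = ["gs:", "buckets"] := by
      rw [show (PySem.Set.ofList ["gs:", "buckets"] : List String) = ["gs:", "buckets"] from rfl]
      simp [PySem.Set.inter, PySem.Set.contains, PySem.Set.mem_ofList, hga, hbu]
    rw [hInter]
    rw [show (if (["gs:", "buckets"] : List String) = [] then L
          else PySem.List.slice L
            (some ((PySem.List.min?
                    (List.map (fun p => ((((PySem.List.index? L p).getD 0 : Nat)) : Int)) ["gs:", "buckets"])
                    fun x => x).getD 0))) =
        PySem.List.slice L (some ((min a b : Nat) : Int)) none by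
      simp only [List.map, hima, himb, Option.getD_some]
      rw [show (PySem.List.min? [((a : Nat) : Int), ((b : Nat) : Int)] (fun x => x)).getD 0 =
            ((min a b : Nat) : Int) by
            simp only [PySem.List.min?, List.foldl]
            split_ifs <;> simp <;> omega]
      simp]
    obtain ⟨ha, hEa, -⟩ := PySem.List.getElem_of_index?_eq_some hima
    obtain ⟨hb, hEb, -⟩ := PySem.List.getElem_of_index?_eq_some himb
    have hm : min a b < L.length := by omega
    have hhead : L[min a b] = "gs:" ∨ L[min a b] = "buckets" := by
      rcases Nat.le_total a b with h | h
      · left; simp only [Nat.min_eq_left h]; exact hEa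
      · right; simp only [Nat.min_eq_right h]; exact hEb
    rw [show pvFirstPrefixIdx L = some (min a b) by simp [pvFirstPrefixIdx, hia, hib]]
    exact pvFound L (min a b) hm hhead
  · -- only "gs:"
    obtain ⟨a, hia⟩ := idx_some_of_mem L _ hga
    have hima : PySem.List.index? L "gs:" = some a := by rw [PySem.List.index?_eq_idxOf?]; exact hia
    have hib : List.idxOf? "buckets" L = none := by
      rw [← PySem.List.index?_eq_idxOf?, PySem.List.index?_eq_none_iff]; exact hbu
    have hInter : (PySem.Set.ofList ["gs:", "buckets"]).inter (PySem.Set.ofList L) = ["gs:"] := by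
      rw [show (PySem.Set.ofList ["gs:", "buckets"] : List String) = ["gs:", "buckets"] from rfl]
      simp [PySem.Set.inter, PySem.Set.contains, PySem.Set.mem_ofList, hga, hbu]
    rw [hInter]
    rw [show (if (["gs:"] : List String) = [] then L
          else PySem.List.slice L
            (some ((PySem.List.min?
                    (List.map (fun p => ((((PySem.List.index? L p).getD 0 : Nat)) : Int)) ["gs:"])
                    fun x => x).getD 0))) =
        PySem.List.slice L (some ((a : Nat) : Int)) none by
      simp only [List.map, hima, Option.getD_some]
      rw [show (PySem.List.min? [((a : Nat) : Int)] (fun x => x)).getD 0 = ((a : Nat) : Int) by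
            simp [PySem.List.min?]]
      simp]
    obtain ⟨ha, hEa, -⟩ := PySem.List.getElem_of_index?_eq_some hima
    rw [show pvFirstPrefixIdx L = some a by simp [pvFirstPrefixIdx, hia, hib]]
    exact pvFound L a ha (Or.inl hEa)
  · -- only "buckets"
    obtain ⟨b, hib⟩ := idx_some_of_mem L _ hbu
    have himb : PySem.List.index? L "buckets" = some b := by rw [PySem.List.index?_eq_idxOf?]; exact hib
    have hia : List.idxOf? "gs:" L = none := by
      rw [← PySem.List.index?_eq_idxOf?, PySem.List.index?_eq_none_iff]; exact hga
    have hInter : (PySem.Set.ofList ["gs:", "buckets"]).inter (PySem.Set.ofList L) = ["buckets"] := by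
      rw [show (PySem.Set.ofList ["gs:", "buckets"] : List String) = ["gs:", "buckets"] from rfl]
      simp [PySem.Set.inter, PySem.Set.contains, PySem.Set.mem_ofList, hga, hbu]
    rw [hInter]
    rw [show (if (["buckets"] : List String) = [] then L
          else PySem.List.slice L
            (some ((PySem.List.min?
                    (List.map (fun p => ((((PySem.List.index? L p).getD 0 : Nat)) : Int)) ["buckets"])
                    fun x => x).getD 0))) =
        PySem.List.slice L (some ((b : Nat) : Int)) none by
      simp only [List.map, himb, Option.getD_some]
      rw [show (PySem.List.min? [((b : Nat) : Int)] (fun x => x)).getD 0 = ((b : Nat) : Int) by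
            simp [PySem.List.min?]]
      simp]
    obtain ⟨hb, hEb, -⟩ := PySem.List.getElem_of_index?_eq_some himb
    rw [show pvFirstPrefixIdx L = some b by simp [pvFirstPrefixIdx, hia, hib]]
    exact pvFound L b hb (Or.inr hEb)
  · -- neither prefix occurs
    have hia : List.idxOf? "gs:" L = none := by
      rw [← PySem.List.index?_eq_idxOf?, PySem.List.index?_eq_none_iff]; exact hga
    have hib : List.idxOf? "buckets" L = none := by
      rw [← PySem.List.index?_eq_idxOf?, PySem.List.index?_eq_none_iff]; exact hbu
    have hInter : (PySem.Set.ofList ["gs:", "buckets"]).inter (PySem.Set.ofList L) = [] := by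
      rw [show (PySem.Set.ofList ["gs:", "buckets"] : List String) = ["gs:", "buckets"] from rfl]
      simp [PySem.Set.inter, PySem.Set.contains, PySem.Set.mem_ofList, hga, hbu]
    rw [hInter]
    rw [show pvFirstPrefixIdx L = none by simp [pvFirstPrefixIdx, hia, hib]]
    simp only [reduceIte, ne_eq, not_true_eq_false, if_false]
    by_cases hs : L = ["/"]
    · simp [hs]
    · rw [if_neg hs, if_neg hs]
      obtain ⟨x, t, rfl⟩ := List.exists_cons_of_ne_nil hpre
      rw [show PySem.List.pyGet? (x :: t) 0 = some x by
        simp [PySem.List.pyGet?, PySem.List.pyIdx?]]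
      have hx1 : x ≠ "gs:" := fun h => hga (h ▸ List.mem_cons_self ..)
      have hx2 : x ≠ "buckets" := fun h => hbu (h ▸ List.mem_cons_self ..)
      have : ¬ ((PySem.Set.ofList ["gs:", "buckets"]).contains x = true) := by
        simp [PySem.Set.contains, PySem.Set.mem_ofList, hx1, hx2]
      exact if_neg (fun hc => this hc.1)

-- ===== VERDICT (by name: the statement is the Claim_ definition above) =====
theorem get_left_parts_py_spec : Claim_equal_get_left_parts_py := by
  intro parts k _ hpre
  unfold Pre_get_left_parts_py at hpre
  unfold Spec_get_left_parts_py
  show get_left_parts_py parts k = get_left_parts_py_alt parts k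
  simp only [get_left_parts_py, get_left_parts_py_alt]
  generalize hg : PySem.List.slice parts none (some k) = L
  rw [hg] at hpre
  exact pvMain L hpre
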